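-- pv_equiv track=rewrite | github.com/FuatAkdemir/Some_Algorithms | EvenPair.py | EvenPairs
-- ===== SOURCE A (Python) =====
-- def EvenPairs(strParam):
--
--     even = False
--     prev = False
--
--     for i in strParam:
--         if i.isnumeric():
--             if int(i) % 2 == 0:
--                 if prev:
--                     return True
--                 even = True
--         else:
--             even = False
--         prev = even
--     return False
-- ===== SOURCE B (Python) =====
-- def EvenPairs(strParam):
--     # Split the string into maximal runs of numeric characters, then check
--     # whether any run contains at least two even digits.
--     runs = []
--     cur = ''
--     for c in strParam:
--         if c.isnumeric():
--             cur += c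
--         else:
--             if cur:
--                 runs.append(cur)
--             cur = ''
--     if cur:
--         runs.append(cur)
--     return any(sum(1 for c in run if int(c) % 2 == 0) >= 2 for run in runs)
-- ===== Notes on version B (the rewrite author's own statement) =====
-- stated objective: alternative
-- what changed: B replaces A's one-pass prev/even flag automaton by an explicit decomposition: first split the string into maximal numeric runs, then return whether any run contains at least two even digits.
import Mathlib
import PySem

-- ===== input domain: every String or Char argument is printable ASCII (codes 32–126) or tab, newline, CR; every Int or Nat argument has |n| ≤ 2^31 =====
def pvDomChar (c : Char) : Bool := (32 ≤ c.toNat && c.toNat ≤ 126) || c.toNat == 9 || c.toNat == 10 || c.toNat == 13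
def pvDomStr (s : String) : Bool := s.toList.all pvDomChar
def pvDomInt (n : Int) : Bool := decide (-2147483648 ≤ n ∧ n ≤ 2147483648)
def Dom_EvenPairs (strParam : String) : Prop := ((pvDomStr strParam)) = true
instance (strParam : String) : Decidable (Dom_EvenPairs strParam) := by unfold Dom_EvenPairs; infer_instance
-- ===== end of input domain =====

-- B splits the string into maximal numeric runs and checks a run for two even
-- digits (explicit run decomposition instead of A's prev/even flag automaton);
-- objective: alternative decomposition, same linear cost.


-- int(i) % 2 == 0 for a single ASCII digit character i: its digit value mod 2.
-- Exact on the ASCII domain, where i.isnumeric() = isdigit and int(i) = code - 48.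
def pvIsEvenDigit (c : Char) : Bool := ((c.toNat : Int) - 48) % 2 == 0

-- ===== PORT A =====
-- the for-loop of A, carrying its two flags `even` and `prev`
def EvenPairsLoop : List Char → Bool → Bool → Bool
  | [], _even, _prev => false
  | c :: rest, even, prev =>
    if PySem.Chars.isdigit c then       -- i.isnumeric(); = isdigit on the ASCII domain
      if pvIsEvenDigit c then           -- int(i) % 2 == 0
        if prev then true
        else EvenPairsLoop rest true true
      else EvenPairsLoop rest even even -- even unchanged, then prev = even
    else EvenPairsLoop rest false false -- even = False, then prev = even

def EvenPairs (strParam : String) : Bool :=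
  EvenPairsLoop strParam.toList false false

-- ===== PORT B =====
-- first pass of Source B: build the list of maximal numeric runs (cur is the run in progress)
def pvRuns : List Char → List Char → List (List Char)
  | [], cur => if cur.isEmpty then [] else [cur]
  | c :: rest, cur =>
    if PySem.Chars.isdigit c then pvRuns rest (cur ++ [c])
    else if cur.isEmpty then pvRuns rest [] else cur :: pvRuns rest []

-- sum(1 for c in run if int(c) % 2 == 0)
def pvCountEven (run : List Char) : Nat := (run.filter pvIsEvenDigit).length

def EvenPairs_alt (strParam : String) : Bool :=
  (pvRuns strParam.toList []).any (fun r => decide (2 ≤ pvCountEven r))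

-- ===== PRECONDITION & SPEC =====
def Spec_EvenPairs (strParam : String) (out : Bool) : Prop := out = EvenPairs_alt strParam
instance (strParam : String) (out : Bool) : Decidable (Spec_EvenPairs strParam out) := by unfold Spec_EvenPairs; infer_instance

-- ===== CLAIM (what is proved, stated in full; the proofs are below) =====
def Claim_equal_EvenPairs : Prop := ∀ (strParam : String), Dom_EvenPairs strParam → Spec_EvenPairs strParam (EvenPairs strParam)

-- ===== LEMMAS AND PROOFS =====

theorem pvCountEven_nil : pvCountEven [] = 0 := rfl

theorem pvCountEven_append (xs : List Char) (c : Char) :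
    pvCountEven (xs ++ [c]) = pvCountEven xs + (if pvIsEvenDigit c then 1 else 0) := by
  by_cases h : pvIsEvenDigit c = true <;> simp [pvCountEven, List.filter_append, h]

theorem pvCountEven_pos_ne_nil {cur : List Char} (h : 1 ≤ pvCountEven cur) :
    cur.isEmpty = false := by
  cases cur with
  | nil => simp [pvCountEven_nil] at h
  | cons a l => simp

-- once the run in progress already holds two even digits, B reports true
theorem pvRuns_ge2 (l : List Char) : ∀ cur, 2 ≤ pvCountEven cur →
    (pvRuns l cur).any (fun r => decide (2 ≤ pvCountEven r)) = true := by
  induction l with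
  | nil =>
    intro cur h
    simp [pvRuns, pvCountEven_pos_ne_nil (by omega : 1 ≤ pvCountEven cur), h]
  | cons c rest ih =>
    intro cur h
    cases hd : PySem.Chars.isdigit c
    · simp only [pvRuns, hd, Bool.false_eq_true, if_false,
        pvCountEven_pos_ne_nil (by omega : 1 ≤ pvCountEven cur)]
      simp [h]
    · simp only [pvRuns, hd, if_true]
      exact ih (cur ++ [c]) (by rw [pvCountEven_append]; omega)

-- loop invariant: the flags equal "the run in progress already has one even digit"
theorem loop_eq_runs (l : List Char) : ∀ (cur : List Char) (e : Bool),
    pvCountEven cur ≤ 1 → e = decide (pvCountEven cur = 1) →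
    EvenPairsLoop l e e = (pvRuns l cur).any (fun r => decide (2 ≤ pvCountEven r)) := by
  induction l with
  | nil =>
    intro cur e h he
    cases hc : cur.isEmpty <;> simp_all [EvenPairsLoop, pvRuns]
  | cons c rest ih =>
    intro cur e h he
    cases hd : PySem.Chars.isdigit c
    · -- non-numeric character: both sides restart the run
      simp only [EvenPairsLoop, pvRuns, hd, Bool.false_eq_true, if_false]
      have ih0 := ih [] false (by simp [pvCountEven_nil]) (by simp [pvCountEven_nil])
      cases hc : cur.isEmpty
      · simp only [Bool.false_eq_true, if_false, List.any_cons]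
        have h2 : decide (2 ≤ pvCountEven cur) = false := by simp; omega
        rw [h2, Bool.false_or]; exact ih0
      · simpa using ih0
    · cases hev : pvIsEvenDigit c
      · -- odd digit: flags unchanged, run extended without a new even digit
        simp only [EvenPairsLoop, pvRuns, hd, hev, Bool.false_eq_true, if_false, if_true]
        exact ih (cur ++ [c]) e (by rw [pvCountEven_append, hev]; simp; omega)
          (by rw [pvCountEven_append, hev]; simpa using he)
      · by_cases h1 : pvCountEven cur = 1
        · -- second even digit in this run: A returns, B's current run reaches 2
          have he' : e = true := by simp [he, h1]
          simp only [EvenPairsLoop, pvRuns, hd, hev, he', if_true]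
          exact (pvRuns_ge2 rest (cur ++ [c])
            (by rw [pvCountEven_append, hev]; simp; omega)).symm
        · -- first even digit of the run
          have h0 : pvCountEven cur = 0 := by omega
          have he' : e = false := by simp [he, h1]
          simp only [EvenPairsLoop, pvRuns, hd, hev, he', if_true,
            Bool.false_eq_true, if_false]
          exact ih (cur ++ [c]) true (by rw [pvCountEven_append, hev]; simp; omega)
            (by rw [pvCountEven_append, hev]; simp [h0])
-- ===== VERDICT (by name: the statement is the Claim_ definition above) =====
theorem EvenPairs_spec : Claim_equal_EvenPairs := by
  intro s _
  unfold Spec_EvenPairs EvenPairs EvenPairs_alt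
  exact loop_eq_runs s.toList [] false (by simp [pvCountEven_nil]) (by simp [pvCountEven_nil])
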